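-- pv_equiv track=rewrite | github.com/apodgorny/daterange_generator | generator.py | get_month_pos
-- ===== SOURCE A (Python) =====
-- def get_month_pos(s):
-- 	pos = -1
-- 	for c in s:
-- 		if c in 'mnN':
-- 			pos += 1
-- 		if c == 'm':
-- 			return pos
-- 	return -1
-- ===== SOURCE B (Python) =====
-- def get_month_pos(s):
--     i = s.find('m')
--     if i == -1:
--         return -1
--     return sum(1 for c in s[:i] if c in 'nN')
-- ===== Notes on version B (the rewrite author's own statement) =====
-- stated objective: simpler
-- what changed: Replaces A's single fused early-exit scan carrying a running counter with a locate-then-count pair: find the first 'm' with s.find, then count the 'n'/'N' characters in the prefix before it.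
import Mathlib
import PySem

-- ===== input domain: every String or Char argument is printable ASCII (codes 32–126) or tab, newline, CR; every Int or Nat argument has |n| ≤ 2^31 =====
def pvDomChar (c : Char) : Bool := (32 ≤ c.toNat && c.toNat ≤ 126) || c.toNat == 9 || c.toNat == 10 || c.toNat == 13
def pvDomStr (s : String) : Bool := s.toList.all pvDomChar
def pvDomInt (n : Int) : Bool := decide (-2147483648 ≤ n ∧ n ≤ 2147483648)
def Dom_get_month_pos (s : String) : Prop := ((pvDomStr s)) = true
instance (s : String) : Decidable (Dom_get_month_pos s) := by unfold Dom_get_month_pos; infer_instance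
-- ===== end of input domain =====

-- B replaces A's fused early-exit scan with locate-first-'m' (s.find) then count 'n'/'N' in the prefix; simpler decomposition, same cost.

-- ===== PORT A =====
-- A's loop: pos accumulator, bump on 'm'/'n'/'N', return pos on 'm'
def get_month_pos_go : List Char → Int → Int
  | [], _ => -1
  | c :: cs, pos =>
    let pos' := if c = 'm' ∨ c = 'n' ∨ c = 'N' then pos + 1 else pos
    if c = 'm' then pos' else get_month_pos_go cs pos'

def get_month_pos (s : String) : Int := get_month_pos_go s.toList (-1)

-- ===== PORT B =====
def get_month_pos_alt (s : String) : Int :=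
  let i := PySem.Str.find s "m"
  if i = -1 then -1
  else ((s.toList.take i.toNat).countP (fun c => c == 'n' || c == 'N') : Int)

-- ===== PRECONDITION & SPEC =====
def Spec_get_month_pos (s : String) (out : Int) : Prop := out = get_month_pos_alt s
instance (s : String) (out : Int) : Decidable (Spec_get_month_pos s out) := by unfold Spec_get_month_pos; infer_instance

-- ===== CLAIM (what is proved, stated in full; the proofs are below) =====
def Claim_equal_get_month_pos : Prop := ∀ (s : String), Dom_get_month_pos s → Spec_get_month_pos s (get_month_pos s)

-- ===== LEMMAS AND PROOFS =====

theorem singleton_infix_iff_mem {c : Char} {l : List Char} : [c] <:+: l ↔ c ∈ l := by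
  constructor
  · rintro ⟨s, t, rfl⟩; simp
  · intro h
    obtain ⟨s, t, rfl⟩ := List.append_of_mem h
    exact ⟨s, t, by simp⟩

theorem singleton_prefix_drop_iff {c : Char} {l : List Char} {j : Nat} :
    [c] <+: l.drop j ↔ l[j]? = some c := by
  constructor
  · rintro ⟨t, ht⟩
    have : (l.drop j)[0]? = some c := by rw [← ht]; simp
    simpa [List.getElem?_drop] using this
  · intro h
    have hj : j < l.length := (List.getElem?_eq_some_iff.mp h).1
    have : l.drop j = c :: l.drop (j + 1) := by
      rw [List.drop_eq_getElem_cons hj]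
      simp [List.getElem?_eq_some_iff.mp h |>.2]
    exact ⟨l.drop (j + 1), by simp [this]⟩

-- Chars.find with a single-char needle is List.findIdx?
theorem find_singleton_eq (l : List Char) (c : Char) :
    PySem.Chars.find l [c] = match List.findIdx? (· = c) l with
      | none => -1 | some i => (i : Int) := by
  cases h : List.findIdx? (· = c) l with
  | none =>
    have hm : c ∉ l := by
      intro hc
      obtain ⟨i, hi, hci⟩ := List.mem_iff_getElem.mp hc
      have := List.findIdx?_eq_none_iff.mp h l[i] (l.getElem_mem hi)
      simp [hci] at this
    simp only []
    exact (PySem.Chars.find_eq_neg_one_iff l [c]).mpr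
      (fun hinf => hm (singleton_infix_iff_mem.mp hinf))
  | some i =>
    obtain ⟨hi, hci, hmin⟩ := List.findIdx?_eq_some_iff_getElem.mp h
    have hci' : l[i] = c := by simpa using hci
    have hmem : c ∈ l := hci' ▸ l.getElem_mem hi
    have hnonneg : 0 ≤ PySem.Chars.find l [c] :=
      (PySem.Chars.find_nonneg_iff l [c]).mpr (singleton_infix_iff_mem.mpr hmem)
    obtain ⟨hpre, hfirst⟩ := PySem.Chars.find_spec (s := l) (sub := [c]) hnonneg
    set f := (PySem.Chars.find l [c]).toNat with hf
    have hfc : l[f]? = some c := singleton_prefix_drop_iff.mp hpre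
    have hflt : f < l.length := (List.getElem?_eq_some_iff.mp hfc).1
    -- i ≤ f: i is minimal by findIdx?; f ≤ i: f is minimal by find_spec
    have h1 : ¬ f < i := by
      intro hlt
      have := hmin f hlt
      simp [(List.getElem?_eq_some_iff.mp hfc).2] at this
    have h2 : ¬ i < f := by
      intro hlt
      exact hfirst i hlt (singleton_prefix_drop_iff.mpr (by simp [List.getElem?_eq_some_iff, hi, hci']))
    have : f = i := by omega
    simp only []
    omega

def countNn (l : List Char) : Int := (l.countP (fun c => c == 'n' || c == 'N') : Int)

theorem go_eq (l : List Char) : ∀ pos : Int,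
    get_month_pos_go l pos = match List.findIdx? (· = 'm') l with
      | none => -1 | some i => pos + 1 + countNn (l.take i) := by
  induction l with
  | nil => intro pos; simp [get_month_pos_go]
  | cons c cs ih =>
    intro pos
    by_cases hm : c = 'm'
    · subst hm
      simp [get_month_pos_go, List.findIdx?_cons, countNn]
    · rw [List.findIdx?_cons]
      simp only [hm, decide_eq_true_eq, if_neg hm]
      have : get_month_pos_go (c :: cs) pos =
          get_month_pos_go cs (if c = 'm' ∨ c = 'n' ∨ c = 'N' then pos + 1 else pos) := by
        simp [get_month_pos_go, hm]
      rw [this, ih]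
      cases h : List.findIdx? (· = 'm') cs with
      | none => simp
      | some i =>
        simp only [Option.map_some]
        by_cases hn : c = 'n' ∨ c = 'N'
        · have : (c == 'n' || c == 'N') = true := by
            rcases hn with h | h <;> simp [h]
          simp [hm, hn, countNn, List.countP_cons, this]
          ring
        · have : (c == 'n' || c == 'N') = false := by
            push_neg at hn
            simp [hn.1, hn.2]
          simp [hm, hn, countNn, List.countP_cons, this]

-- ===== VERDICT (by name: the statement is the Claim_ definition above) =====
theorem get_month_pos_spec : Claim_equal_get_month_pos := by
  intro s _
  unfold Spec_get_month_pos get_month_pos get_month_pos_alt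
  rw [go_eq]
  have hfind : PySem.Str.find s "m" = PySem.Chars.find s.toList ['m'] := by
    simp [PySem.Str.find_eq]
  rw [hfind, find_singleton_eq s.toList 'm']
  cases h : List.findIdx? (· = 'm') s.toList with
  | none => simp
  | some i => simp [countNn]
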